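-- pv_equiv track=rewrite | github.com/romirm/pennapps | ADAS/meta_agent.py | _parse_design_proposals
-- ===== SOURCE A (Python) =====
-- from typing import Dict, Any, List
--
-- def _parse_design_proposals(response_text: str) -> List[Dict[str, Any]]:
--     """Parse design proposals from meta-agent response"""
--
--     proposals = []
--     current_proposal = None
--     in_code_block = False
--     code_lines = []
--
--     lines = response_text.split("\n")
--
--     for line in lines:
--         line = line.strip()
--
--         # Start of new proposal
--         if line.startswith("PROPOSAL_"):
--             if current_proposal:
--                 proposals.append(current_proposal)
--
--             current_proposal = {
--                 "proposal_id": line.split(":")[0] if ":" in line else line,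
--                 "design_concept": "",
--                 "workflow_type": "multi_step_reasoning",
--                 "core_innovation": "",
--                 "forward_function": "",
--                 "prompt_strategy": "",
--                 "model_requirements": "",
--                 "expected_strengths": "",
--                 "potential_weaknesses": "",
--             }
--
--         elif current_proposal:
--             # Parse proposal fields
--             if line.startswith("Design Concept:"):
--                 current_proposal["design_concept"] = line.split(":", 1)[1].strip()
--             elif line.startswith("Workflow Type:"):
--                 current_proposal["workflow_type"] = line.split(":", 1)[1].strip()
--             elif line.startswith("Core Innovation:"):
--                 current_proposal["core_innovation"] = line.split(":", 1)[1].strip()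
--             elif line.startswith("Prompt Strategy:"):
--                 current_proposal["prompt_strategy"] = line.split(":", 1)[1].strip()
--             elif line.startswith("Model Requirements:"):
--                 current_proposal["model_requirements"] = line.split(":", 1)[
--                     1
--                 ].strip()
--             elif line.startswith("Expected Strengths:"):
--                 current_proposal["expected_strengths"] = line.split(":", 1)[
--                     1
--                 ].strip()
--             elif line.startswith("Potential Weaknesses:"):
--                 current_proposal["potential_weaknesses"] = line.split(":", 1)[
--                     1
--                 ].strip()
--
--             # Handle code blocks
--             elif line.startswith("```python") or line.startswith("```"):
--                 in_code_block = True
--                 code_lines = []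
--             elif line.startswith("```") and in_code_block:
--                 in_code_block = False
--                 current_proposal["forward_function"] = "\n".join(code_lines)
--             elif in_code_block:
--                 code_lines.append(line)
--
--     # Add last proposal
--     if current_proposal:
--         proposals.append(current_proposal)
--
--     return proposals
-- ===== SOURCE B (Python) =====
-- from typing import Dict, Any, List
--
-- _FIELDS = [
--     ("Design Concept:", "design_concept"),
--     ("Workflow Type:", "workflow_type"),
--     ("Core Innovation:", "core_innovation"),
--     ("Prompt Strategy:", "prompt_strategy"),
--     ("Model Requirements:", "model_requirements"),
--     ("Expected Strengths:", "expected_strengths"),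
--     ("Potential Weaknesses:", "potential_weaknesses"),
-- ]
--
--
-- def _build(group: List[str]) -> Dict[str, Any]:
--     header, body = group[0], group[1:]
--     d = {
--         "proposal_id": header.split(":")[0] if ":" in header else header,
--         "design_concept": "",
--         "workflow_type": "multi_step_reasoning",
--         "core_innovation": "",
--         "forward_function": "",
--         "prompt_strategy": "",
--         "model_requirements": "",
--         "expected_strengths": "",
--         "potential_weaknesses": "",
--     }
--     for line in body:
--         for prefix, key in _FIELDS:
--             if line.startswith(prefix):
--                 d[key] = line.split(":", 1)[1].strip()
--                 break
--     return d
--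
--
-- def _parse_design_proposals(response_text: str) -> List[Dict[str, Any]]:
--     """Two-phase parse: group stripped lines by PROPOSAL_ headers, then build
--     each proposal dict with a table-driven field scan (no code-block state:
--     A's forward_function branch is unreachable, the field is always '')."""
--     groups: List[List[str]] = []
--     current = None
--     for raw in response_text.split("\n"):
--         line = raw.strip()
--         if line.startswith("PROPOSAL_"):
--             current = [line]
--             groups.append(current)
--         elif current is not None:
--             current.append(line)
--     return [_build(g) for g in groups]
-- ===== Notes on version B (the rewrite author's own statement) =====
-- stated objective: simpler
-- what changed: Replaced A's one-pass state machine (current dict, 7-branch elif ladder, dead code-block tracking) by a two-phase decomposition: group stripped lines under PROPOSAL_ headers, then build each proposal dict with a table-driven field scan; the unreachable forward_function code-block logic is dropped.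
import Mathlib
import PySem

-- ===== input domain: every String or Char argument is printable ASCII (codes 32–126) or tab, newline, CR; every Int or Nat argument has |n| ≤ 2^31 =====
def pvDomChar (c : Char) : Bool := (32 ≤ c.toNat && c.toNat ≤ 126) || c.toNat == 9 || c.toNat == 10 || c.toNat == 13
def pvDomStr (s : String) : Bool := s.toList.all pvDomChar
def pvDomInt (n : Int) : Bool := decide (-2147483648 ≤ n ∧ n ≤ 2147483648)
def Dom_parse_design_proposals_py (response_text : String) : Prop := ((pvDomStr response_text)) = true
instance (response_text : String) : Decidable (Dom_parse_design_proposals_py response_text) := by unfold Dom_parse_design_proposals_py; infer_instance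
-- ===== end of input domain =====

-- B replaces A's single-pass state machine (current dict + dead code-block tracking) by a
-- two-phase decomposition: group stripped lines under PROPOSAL_ headers, then build each
-- dict with a table-driven field scan (objective: simpler).

-- ===== PORT A =====

-- line.split(":", 1)[1].strip()  (call sites guarantee ":" ∈ line, so index 1 exists; pyGetD default unreachable)
def aColonVal (line : String) : String :=
  PySem.Str.strip (PySem.List.pyGetD ((PySem.Str.splitMax? line ":" 1).getD []) 1 "")

-- the fresh current_proposal dict
def aInitDict (line : String) : PySem.Dict String String :=
  PySem.Dict.ofList
    [("proposal_id",
        if PySem.Str.isIn ":" line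
        then PySem.List.pyGetD ((PySem.Str.split? line ":").getD []) 0 ""
        else line),
     ("design_concept", ""), ("workflow_type", "multi_step_reasoning"),
     ("core_innovation", ""), ("forward_function", ""), ("prompt_strategy", ""),
     ("model_requirements", ""), ("expected_strengths", ""), ("potential_weaknesses", "")]

-- loop state: (proposals, current_proposal, in_code_block, code_lines); one iteration on the STRIPPED line
def aStep' (st : List (PySem.Dict String String) × Option (PySem.Dict String String) × Bool × List String)
    (line : String) :
    List (PySem.Dict String String) × Option (PySem.Dict String String) × Bool × List String :=
  match st with
  | (props, cur, icb, cls) =>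
    if PySem.Str.startswith line "PROPOSAL_" then
      -- `if current_proposal:` — a set current_proposal always has 9 items, hence truthy
      ((match cur with | some d => props ++ [d] | none => props), some (aInitDict line), icb, cls)
    else
      match cur with
      | none => (props, none, icb, cls)
      | some d =>
        if PySem.Str.startswith line "Design Concept:" then
          (props, some (d.insert "design_concept" (aColonVal line)), icb, cls)
        else if PySem.Str.startswith line "Workflow Type:" then
          (props, some (d.insert "workflow_type" (aColonVal line)), icb, cls)
        else if PySem.Str.startswith line "Core Innovation:" then
          (props, some (d.insert "core_innovation" (aColonVal line)), icb, cls)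
        else if PySem.Str.startswith line "Prompt Strategy:" then
          (props, some (d.insert "prompt_strategy" (aColonVal line)), icb, cls)
        else if PySem.Str.startswith line "Model Requirements:" then
          (props, some (d.insert "model_requirements" (aColonVal line)), icb, cls)
        else if PySem.Str.startswith line "Expected Strengths:" then
          (props, some (d.insert "expected_strengths" (aColonVal line)), icb, cls)
        else if PySem.Str.startswith line "Potential Weaknesses:" then
          (props, some (d.insert "potential_weaknesses" (aColonVal line)), icb, cls)
        else if PySem.Str.startswith line "```python" || PySem.Str.startswith line "```" then
          (props, some d, true, [])
        else if PySem.Str.startswith line "```" && icb then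
          (props, some (d.insert "forward_function" (PySem.Str.join "\n" cls)), false, cls)
        else if icb then
          (props, some d, icb, cls ++ [line])
        else (props, some d, icb, cls)

-- one iteration: line = line.strip()
def aStep (st : List (PySem.Dict String String) × Option (PySem.Dict String String) × Bool × List String)
    (raw : String) :
    List (PySem.Dict String String) × Option (PySem.Dict String String) × Bool × List String :=
  aStep' st (PySem.Str.strip raw)

def parse_design_proposals_py (response_text : String) : List (List (String × String)) :=
  let lines := (PySem.Str.split? response_text "\n").getD []
  match lines.foldl aStep ([], none, false, []) with
  | (props, cur, _, _) =>
    ((match cur with | some d => props ++ [d] | none => props)).map PySem.Dict.items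

-- ===== PORT B =====

-- line.split(":", 1)[1].strip()  (only called when the matched prefix contains ":")
def bColonVal (line : String) : String :=
  PySem.Str.strip (PySem.List.pyGetD ((PySem.Str.splitMax? line ":" 1).getD []) 1 "")

def bFields : List (String × String) :=
  [("Design Concept:", "design_concept"), ("Workflow Type:", "workflow_type"),
   ("Core Innovation:", "core_innovation"), ("Prompt Strategy:", "prompt_strategy"),
   ("Model Requirements:", "model_requirements"), ("Expected Strengths:", "expected_strengths"),
   ("Potential Weaknesses:", "potential_weaknesses")]

-- the inner `for prefix, key in _FIELDS: … break`
def bApplyFields (tbl : List (String × String)) (d : PySem.Dict String String) (line : String) :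
    PySem.Dict String String :=
  match tbl with
  | [] => d
  | (p, k) :: rest =>
    if PySem.Str.startswith line p then d.insert k (bColonVal line) else bApplyFields rest d line

def bInitDict (header : String) : PySem.Dict String String :=
  PySem.Dict.ofList
    [("proposal_id",
        if PySem.Str.isIn ":" header
        then PySem.List.pyGetD ((PySem.Str.split? header ":").getD []) 0 ""
        else header),
     ("design_concept", ""), ("workflow_type", "multi_step_reasoning"),
     ("core_innovation", ""), ("forward_function", ""), ("prompt_strategy", ""),
     ("model_requirements", ""), ("expected_strengths", ""), ("potential_weaknesses", "")]

def bBuild : List String → PySem.Dict String String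
  | [] => PySem.Dict.empty            -- unreachable: every group starts with its header
  | h :: body => body.foldl (bApplyFields bFields) (bInitDict h)

-- grouping pass on the stripped line; the open group is kept apart as `cur`
-- (Python aliases it as groups[-1]; it is appended on close/at the end)
def bGStep' (st : List (List String) × Option (List String)) (line : String) :
    List (List String) × Option (List String) :=
  match st with
  | (gs, cur) =>
    if PySem.Str.startswith line "PROPOSAL_" then
      ((match cur with | some g => gs ++ [g] | none => gs), some [line])
    else
      match cur with
      | none => (gs, none)
      | some g => (gs, some (g ++ [line]))

def bGStep (st : List (List String) × Option (List String)) (raw : String) :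
    List (List String) × Option (List String) :=
  bGStep' st (PySem.Str.strip raw)

def parse_design_proposals_py_alt (response_text : String) : List (List (String × String)) :=
  let lines := (PySem.Str.split? response_text "\n").getD []
  match lines.foldl bGStep ([], none) with
  | (gs, cur) =>
    ((match cur with | some g => gs ++ [g] | none => gs)).map (fun g => (bBuild g).items)

-- ===== PRECONDITION & SPEC =====
def Spec_parse_design_proposals_py (response_text : String) (out : List (List (String × String))) : Prop := out = parse_design_proposals_py_alt response_text
instance (response_text : String) (out : List (List (String × String))) : Decidable (Spec_parse_design_proposals_py response_text out) := by unfold Spec_parse_design_proposals_py; infer_instance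

-- ===== CLAIM (what is proved, stated in full; the proofs are below) =====
def Claim_equal_parse_design_proposals_py : Prop := ∀ (response_text : String), Dom_parse_design_proposals_py response_text → Spec_parse_design_proposals_py response_text (parse_design_proposals_py response_text)

-- ===== LEMMAS AND PROOFS =====

-- finalization of each loop (proof-side abbreviations of the ports' final match)
def finA (st : List (PySem.Dict String String) × Option (PySem.Dict String String) × Bool × List String) :
    List (List (String × String)) :=
  match st with
  | (props, cur, _, _) =>
    ((match cur with | some d => props ++ [d] | none => props)).map PySem.Dict.items

def finB (st : List (List String) × Option (List String)) : List (List (String × String)) :=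
  match st with
  | (gs, cur) =>
    ((match cur with | some g => gs ++ [g] | none => gs)).map (fun g => (bBuild g).items)

-- one A-iteration on a PROPOSAL_ header line (no open proposal / an open proposal)
lemma aStep'_header_none (props : List (PySem.Dict String String))
    (icb : Bool) (cls : List String) (line : String)
    (hh : PySem.Str.startswith line "PROPOSAL_" = true) :
    aStep' (props, none, icb, cls) line = (props, some (aInitDict line), icb, cls) := by
  simp only [aStep']
  rw [if_pos hh]

lemma aStep'_header_some (props : List (PySem.Dict String String))
    (d : PySem.Dict String String) (icb : Bool) (cls : List String) (line : String)
    (hh : PySem.Str.startswith line "PROPOSAL_" = true) :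
    aStep' (props, some d, icb, cls) line = (props ++ [d], some (aInitDict line), icb, cls) := by
  simp only [aStep']
  rw [if_pos hh]

-- one B-iteration on a PROPOSAL_ header line (no open group / an open group)
lemma bGStep'_header_none (gs : List (List String)) (line : String)
    (hh : PySem.Str.startswith line "PROPOSAL_" = true) :
    bGStep' (gs, none) line = (gs, some [line]) := by
  simp only [bGStep']
  rw [if_pos hh]

lemma bGStep'_header_some (gs : List (List String)) (g : List String) (line : String)
    (hh : PySem.Str.startswith line "PROPOSAL_" = true) :
    bGStep' (gs, some g) line = (gs ++ [g], some [line]) := by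
  simp only [bGStep']
  rw [if_pos hh]

-- before the first header both loops ignore the line
lemma aStep'_none (props : List (PySem.Dict String String)) (icb : Bool) (cls : List String)
    (line : String) (hh : PySem.Str.startswith line "PROPOSAL_" = false) :
    aStep' (props, none, icb, cls) line = (props, none, icb, cls) := by
  simp only [aStep']
  rw [if_neg (by rw [hh]; simp)]

lemma bGStep'_none (gs : List (List String)) (line : String)
    (hh : PySem.Str.startswith line "PROPOSAL_" = false) :
    bGStep' (gs, none) line = (gs, none) := by
  simp only [bGStep']
  rw [if_neg (by rw [hh]; simp)]

-- a body line joins the open group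
lemma bGStep'_body (gs : List (List String)) (g : List String) (line : String)
    (hh : PySem.Str.startswith line "PROPOSAL_" = false) :
    bGStep' (gs, some g) line = (gs, some (g ++ [line])) := by
  simp only [bGStep']
  rw [if_neg (by rw [hh]; simp)]

-- A's field ladder on a non-header line keeps proposals, and updates the dict exactly as B's table scan does
lemma aStep'_some (props : List (PySem.Dict String String)) (d : PySem.Dict String String)
    (icb : Bool) (cls : List String) (line : String)
    (h : PySem.Str.startswith line "PROPOSAL_" = false) :
    ∃ icb' cls', aStep' (props, some d, icb, cls) line
      = (props, some (bApplyFields bFields d line), icb', cls') := by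
  simp only [aStep', h, Bool.false_eq_true, if_false]
  simp only [bFields, bApplyFields]
  simp only [show bColonVal = aColonVal from rfl]
  by_cases h1 : PySem.Str.startswith line "Design Concept:" = true
  · exact ⟨icb, cls, by rw [if_pos h1, if_pos h1]⟩
  rw [if_neg h1, if_neg h1]
  by_cases h2 : PySem.Str.startswith line "Workflow Type:" = true
  · exact ⟨icb, cls, by rw [if_pos h2, if_pos h2]⟩
  rw [if_neg h2, if_neg h2]
  by_cases h3 : PySem.Str.startswith line "Core Innovation:" = true
  · exact ⟨icb, cls, by rw [if_pos h3, if_pos h3]⟩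
  rw [if_neg h3, if_neg h3]
  by_cases h4 : PySem.Str.startswith line "Prompt Strategy:" = true
  · exact ⟨icb, cls, by rw [if_pos h4, if_pos h4]⟩
  rw [if_neg h4, if_neg h4]
  by_cases h5 : PySem.Str.startswith line "Model Requirements:" = true
  · exact ⟨icb, cls, by rw [if_pos h5, if_pos h5]⟩
  rw [if_neg h5, if_neg h5]
  by_cases h6 : PySem.Str.startswith line "Expected Strengths:" = true
  · exact ⟨icb, cls, by rw [if_pos h6, if_pos h6]⟩
  rw [if_neg h6, if_neg h6]
  by_cases h7 : PySem.Str.startswith line "Potential Weaknesses:" = true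
  · exact ⟨icb, cls, by rw [if_pos h7, if_pos h7]⟩
  rw [if_neg h7, if_neg h7]
  by_cases h8 : (PySem.Str.startswith line "```python" || PySem.Str.startswith line "```") = true
  · exact ⟨true, [], by rw [if_pos h8]⟩
  rw [if_neg h8]
  -- the forward_function branch is dead: h8 already refutes `startswith line "```"`
  have h9 : ¬ ((PySem.Str.startswith line "```" && icb) = true) := by
    simp only [Bool.or_eq_true, not_or] at h8
    simp only [Bool.and_eq_true, not_and]
    intro hc
    exact absurd hc h8.2
  rw [if_neg h9]
  by_cases h10 : icb = true
  · exact ⟨icb, cls ++ [line], by rw [if_pos h10]⟩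
  · exact ⟨icb, cls, by rw [if_neg h10]⟩

-- appending one body line to the open group composes with bBuild
lemma bBuild_append (h : String) (t : List String) (line : String) :
    bBuild (h :: (t ++ [line])) = bApplyFields bFields (bBuild (h :: t)) line := by
  simp [bBuild, List.foldl_append]

-- a fresh group builds exactly A's fresh dict (stated to avoid whnf-expensive defeq at use sites)
lemma init_eq (line : String) : aInitDict line = bBuild [line] := by
  simp only [bBuild, List.foldl_nil]
  unfold aInitDict bInitDict
  rfl

-- the loop invariant: A's state is B's state mapped through bBuild
lemma main_invariant (ls : List String) (gs : List (List String)) (cur : Option (List String))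
    (icb : Bool) (cls : List String)
    (hcur : cur = none ∨ ∃ h t, cur = some (h :: t)) :
    finA (ls.foldl aStep (gs.map bBuild, cur.map bBuild, icb, cls))
      = finB (ls.foldl bGStep (gs, cur)) := by
  induction ls generalizing gs cur icb cls with
  | nil =>
    rcases hcur with rfl | ⟨h, t, rfl⟩ <;>
      simp [finA, finB, List.map_append, List.map_map, Function.comp]
  | cons l ls ih =>
    simp only [List.foldl_cons]
    rw [show aStep (gs.map bBuild, cur.map bBuild, icb, cls) l
          = aStep' (gs.map bBuild, cur.map bBuild, icb, cls) (PySem.Str.strip l) from rfl,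
        show bGStep (gs, cur) l = bGStep' (gs, cur) (PySem.Str.strip l) from rfl]
    generalize PySem.Str.strip l = line
    rcases Bool.eq_false_or_eq_true (PySem.Str.startswith line "PROPOSAL_") with hh | hh
    · -- header line: close the open group/dict, open a fresh one
      rcases hcur with rfl | ⟨h, t, rfl⟩
      · rw [show (none : Option (List String)).map bBuild = none from rfl,
            aStep'_header_none _ icb cls line hh, bGStep'_header_none gs line hh,
            init_eq line]
        have ih' := ih gs (some [line]) icb cls (Or.inr ⟨line, [], rfl⟩)
        simp only [Option.map_some] at ih'
        exact ih' 
      · rw [show (some (h :: t)).map bBuild = some (bBuild (h :: t)) from rfl,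
            aStep'_header_some _ (bBuild (h :: t)) icb cls line hh,
            bGStep'_header_some gs (h :: t) line hh,
            show gs.map bBuild ++ [bBuild (h :: t)] = (gs ++ [h :: t]).map bBuild by
              simp,
            init_eq line]
        have ih' := ih (gs ++ [h :: t]) (some [line]) icb cls (Or.inr ⟨line, [], rfl⟩)
        simp only [Option.map_some] at ih'
        exact ih' 
    · -- body line
      rcases hcur with rfl | ⟨h, t, rfl⟩
      · rw [show (none : Option (List String)).map bBuild = none from rfl,
            aStep'_none _ icb cls line hh, bGStep'_none gs line hh]
        exact ih gs none icb cls (Or.inl rfl)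
      · obtain ⟨icb', cls', hstep⟩ := aStep'_some (gs.map bBuild) (bBuild (h :: t)) icb cls line hh
        rw [show (some (h :: t)).map bBuild = some (bBuild (h :: t)) from rfl, hstep,
            ← bBuild_append h t line, bGStep'_body gs (h :: t) line hh]
        exact ih gs (some (h :: (t ++ [line]))) icb' cls' (Or.inr ⟨h, t ++ [line], rfl⟩)
-- ===== VERDICT (by name: the statement is the Claim_ definition above) =====
theorem parse_design_proposals_py_spec : Claim_equal_parse_design_proposals_py := by
  intro rt _
  unfold Spec_parse_design_proposals_py parse_design_proposals_py parse_design_proposals_py_alt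
  exact main_invariant ((PySem.Str.split? rt "\n").getD []) [] none false [] (Or.inl rfl)
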